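-- pv_equiv track=rewrite | github.com/aakhundov/sequence-labeling | convert/convert_germeval.py | get_label_count_pairs
-- ===== SOURCE A (Python) =====
-- def get_label_count_pairs(sentence_pairs_per_source):
--     label_counts = {}
--     for file in sentence_pairs_per_source.keys():
--         for sentence in sentence_pairs_per_source[file]:
--             for pair in sentence:
--                 label = pair[1]
--                 if label not in label_counts:
--                     label_counts[label] = 0
--                 label_counts[label] += 1
--
--     return [(lb, label_counts[lb]) for lb in sorted(label_counts.keys())]
-- ===== SOURCE B (Python) =====
-- def get_label_count_pairs(sentence_pairs_per_source):
--     labels = []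
--     for sentences in sentence_pairs_per_source.values():
--         for sentence in sentences:
--             for pair in sentence:
--                 labels.append(pair[1])
--     labels.sort()
--     result = []
--     i, n = 0, len(labels)
--     while i < n:
--         j = i
--         while j < n and labels[j] == labels[i]:
--             j += 1
--         result.append((labels[i], j - i))
--         i = j
--     return result
-- ===== Notes on version B (the rewrite author's own statement) =====
-- stated objective: alternative
-- what changed: B flattens all labels into one list, sorts that list, and emits (label, run-length) pairs by scanning consecutive runs, instead of A's counting dict followed by sorting the distinct keys.
import Mathlib
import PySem

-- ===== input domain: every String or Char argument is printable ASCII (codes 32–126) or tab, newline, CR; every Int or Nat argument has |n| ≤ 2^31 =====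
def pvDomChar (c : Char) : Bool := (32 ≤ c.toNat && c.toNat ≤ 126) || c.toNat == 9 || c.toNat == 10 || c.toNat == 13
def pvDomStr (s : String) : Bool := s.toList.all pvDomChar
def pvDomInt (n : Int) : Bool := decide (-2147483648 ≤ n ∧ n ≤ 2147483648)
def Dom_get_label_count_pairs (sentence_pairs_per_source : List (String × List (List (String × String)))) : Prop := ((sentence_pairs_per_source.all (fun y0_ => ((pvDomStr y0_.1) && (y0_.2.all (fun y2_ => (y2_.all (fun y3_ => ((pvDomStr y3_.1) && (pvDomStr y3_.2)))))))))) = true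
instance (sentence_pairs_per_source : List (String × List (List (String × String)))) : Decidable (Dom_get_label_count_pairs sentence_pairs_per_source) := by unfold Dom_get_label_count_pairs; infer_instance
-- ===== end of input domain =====

-- B flattens all labels into one list, sorts it, and emits (label, run length) per
-- consecutive run, instead of A's hash-counting dict followed by sorting the keys
-- (objective: alternative, same result).

-- ===== PORT A =====
def get_label_count_pairs (sentence_pairs_per_source : List (String × List (List (String × String)))) : List (String × Int) :=
  let d := PySem.Dict.ofList sentence_pairs_per_source
  let label_counts :=
    d.keys.foldl (fun counts file =>
      (d.getD file []).foldl (fun counts sentence =>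
        sentence.foldl (fun counts pair =>
          let label := pair.2
          let counts' := if counts.contains label then counts else counts.insert label 0
          counts'.insert label (counts'.getD label 0 + 1)) counts) counts) PySem.Dict.empty
  (PySem.List.sorted label_counts.keys (fun x => x)).map (fun lb => (lb, label_counts.getD lb 0))

-- ===== PORT B =====
-- the inner `while labels[j] == labels[i]` run of Source B: run length = takeWhile, rest = dropWhile
def pyRunLengths (labels : List String) : List (String × Int) :=
  match labels with
  | [] => []
  | x :: xs =>
      (x, ((xs.takeWhile (· == x)).length : Int) + 1) :: pyRunLengths (xs.dropWhile (· == x))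
termination_by labels.length
decreasing_by
  simp only [List.length_cons]
  have := List.length_dropWhile_le (· == x) xs
  omega

def get_label_count_pairs_alt (sentence_pairs_per_source : List (String × List (List (String × String)))) : List (String × Int) :=
  let labels := (PySem.Dict.ofList sentence_pairs_per_source).values.flatMap (fun sentences =>
      sentences.flatMap (fun sentence => sentence.map (fun pair => pair.2)))
  pyRunLengths (PySem.List.sorted labels (fun x => x))

-- ===== PRECONDITION & SPEC =====
def Spec_get_label_count_pairs (sentence_pairs_per_source : List (String × List (List (String × String)))) (out : List (String × Int)) : Prop := out = get_label_count_pairs_alt sentence_pairs_per_source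
instance (sentence_pairs_per_source : List (String × List (List (String × String)))) (out : List (String × Int)) : Decidable (Spec_get_label_count_pairs sentence_pairs_per_source out) := by unfold Spec_get_label_count_pairs; infer_instance

-- ===== CLAIM (what is proved, stated in full; the proofs are below) =====
def Claim_equal_get_label_count_pairs : Prop := ∀ (sentence_pairs_per_source : List (String × List (List (String × String)))), Dom_get_label_count_pairs sentence_pairs_per_source → Spec_get_label_count_pairs sentence_pairs_per_source (get_label_count_pairs sentence_pairs_per_source)

-- ===== LEMMAS AND PROOFS =====

-- all the labels, flattened in dict-iteration order
def flatLabels (d : PySem.Dict String (List (List (String × String)))) : List String :=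
  d.items.flatMap (fun p => p.2.flatMap (fun sentence => sentence.map (fun pair => pair.2)))

-- A's per-label body is exactly Counter's modify step
theorem stepA_eq_modify (c : PySem.Dict String Int) (lab : String) :
    (if c.contains lab then c else c.insert lab 0).insert lab
      ((if c.contains lab then c else c.insert lab 0).getD lab 0 + 1)
    = c.modify lab 0 (· + 1) := by
  cases hc : c.contains lab with
  | true => simp [PySem.Dict.modify]
  | false =>
      simp [PySem.Dict.modify, PySem.Dict.insert_insert_self,
        PySem.Dict.getD_insert_self, PySem.Dict.getD_of_not_contains c (0 : Int) hc]

-- A's nested counting loop is Counter(flatLabels d)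
theorem countsA_eq_counter (d : PySem.Dict String (List (List (String × String)))) (hnd : d.keys.Nodup) :
    d.keys.foldl (fun counts file =>
      (d.getD file []).foldl (fun counts sentence =>
        sentence.foldl (fun counts pair =>
          (if counts.contains pair.2 then counts else counts.insert pair.2 0).insert pair.2
            ((if counts.contains pair.2 then counts else counts.insert pair.2 0).getD pair.2 0 + 1)) counts) counts)
      PySem.Dict.empty
    = PySem.Dict.counter (flatLabels d) := by
  have hitems := PySem.Dict.items_eq_map_keys d hnd ([] : List (List (String × String)))
  have hfun : (fun (counts : PySem.Dict String Int) (pair : String × String) =>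
      (if counts.contains pair.2 then counts else counts.insert pair.2 0).insert pair.2
        ((if counts.contains pair.2 then counts else counts.insert pair.2 0).getD pair.2 0 + 1))
      = (fun (counts : PySem.Dict String Int) (pair : String × String) =>
          counts.modify pair.2 0 (· + 1)) := by
    funext c p
    exact stepA_eq_modify c p.2
  rw [PySem.Dict.counter_eq_foldl, flatLabels, hitems]
  simp only [List.foldl_flatMap, List.foldl_map, hfun]

-- run-length encoding of a sorted list = (sorted distinct values, their counts)
theorem pyRunLengths_sorted : ∀ (n : Nat) (S : List String), S.length ≤ n →
    S.Pairwise (· ≤ ·) →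
    pyRunLengths S
      = (PySem.List.sorted (PySem.Set.ofList S) (fun x => x)).map
          (fun k => (k, (S.count k : Int))) := by
  intro n
  induction n with
  | zero =>
      intro S hlen _
      have : S = [] := List.length_eq_zero_iff.mp (Nat.le_zero.mp hlen)
      subst this
      simp [pyRunLengths, PySem.Set.ofList_nil, PySem.List.sorted_eq_nil_iff]
  | succ n ih =>
      intro S hlen hpw
      cases S with
      | nil => simp [pyRunLengths, PySem.Set.ofList_nil, PySem.List.sorted_eq_nil_iff]
      | cons x xs =>
        set run := xs.takeWhile (· == x) with hrun_def
        set rest := xs.dropWhile (· == x) with hrest_def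
        have hsplit : run ++ rest = xs := List.takeWhile_append_dropWhile
        have hrun_eq : ∀ a ∈ run, a = x := by
          intro a ha
          rw [hrun_def] at ha
          exact eq_of_beq (List.mem_takeWhile_imp (p := (· == x)) ha)
        obtain ⟨hx_le, hxs_pw⟩ := List.pairwise_cons.mp hpw
        have hrest_sub : ∀ z ∈ rest, z ∈ xs := fun z hz => (List.dropWhile_sublist _).subset hz
        have hrest_pw : rest.Pairwise (· ≤ ·) := List.Pairwise.sublist (List.dropWhile_sublist _) hxs_pw
        have hrest_gt : ∀ z ∈ rest, x < z := by
          intro z hz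
          cases hre : rest with
          | nil => rw [hre] at hz; exact absurd hz (List.not_mem_nil)
          | cons y t =>
            have hhead := List.head?_dropWhile_not (· == x) xs
            rw [← hrest_def, hre] at hhead
            simp only [List.head?_cons] at hhead
            have hyx : y ≠ x := by simpa using hhead
            have hxy : x < y :=
              lt_of_le_of_ne (hx_le y (hrest_sub y (hre ▸ List.mem_cons_self))) (Ne.symm hyx)
            rw [hre] at hz
            rcases List.mem_cons.mp hz with rfl | hz'
            · exact hxy
            · have hyz : y ≤ z := (List.pairwise_cons.mp (hre ▸ hrest_pw)).1 z hz'
              exact lt_of_lt_of_le hxy hyz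
        have hx_notin : x ∉ rest := fun hm => lt_irrefl x (hrest_gt x hm)
        have hcount_run : ∀ k, k ≠ x → run.count k = 0 := by
          intro k hk
          exact List.count_eq_zero.mpr (fun hm => hk (hrun_eq k hm))
        have hcx : (x :: xs).count x = run.length + 1 := by
          rw [← hsplit]
          have h1 : run.count x = run.length :=
            List.count_eq_length.mpr (fun b hb => (hrun_eq b hb).symm)
          have h2 : rest.count x = 0 := List.count_eq_zero.mpr hx_notin
          simp [List.count_append, h1, h2]
        have hck : ∀ k ∈ rest, (x :: xs).count k = rest.count k := by
          intro k hk
          have hkx : k ≠ x := fun h => lt_irrefl x (h ▸ hrest_gt k hk)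
          rw [← hsplit]
          simp [List.count_cons, List.count_append, hcount_run k hkx,
            (beq_eq_false_iff_ne).mpr (fun h => hkx h.symm)]
        have hnd_tail : (PySem.List.sorted (PySem.Set.ofList rest) (fun a => a)).Nodup :=
          (PySem.List.sorted_ofList_pairwise_lt rest).imp (fun h => ne_of_lt h)
        have hmem_tail : ∀ k, k ∈ PySem.List.sorted (PySem.Set.ofList rest) (fun a => a) ↔ k ∈ rest := by
          intro k
          rw [PySem.List.mem_sorted, PySem.Set.mem_ofList]
        have hsorted : PySem.List.sorted (PySem.Set.ofList (x :: xs)) (fun a => a)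
            = x :: PySem.List.sorted (PySem.Set.ofList rest) (fun a => a) := by
          apply PySem.List.sorted_eq_of_perm_of_pairwise_lt
          · rw [List.perm_ext_iff_of_nodup
              (List.nodup_cons.mpr ⟨fun hm => hx_notin ((hmem_tail x).mp hm), hnd_tail⟩)
              (PySem.Set.nodup_ofList _)]
            intro a
            rw [List.mem_cons, hmem_tail, PySem.Set.mem_ofList, List.mem_cons]
            constructor
            · rintro (rfl | ha)
              · exact Or.inl rfl
              · exact Or.inr (hrest_sub a ha)
            · rintro (rfl | ha)
              · exact Or.inl rfl
              · rw [← hsplit] at ha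
                rcases List.mem_append.mp ha with h | h
                · exact Or.inl (hrun_eq a h)
                · exact Or.inr h
          · exact List.pairwise_cons.mpr
              ⟨fun z hz => hrest_gt z ((hmem_tail z).mp hz),
               PySem.List.sorted_ofList_pairwise_lt rest⟩
        have hlen_rest : rest.length ≤ n := by
          have h1 : rest.length ≤ xs.length := List.length_dropWhile_le _ _
          simp only [List.length_cons] at hlen
          omega
        rw [pyRunLengths, ← hrun_def, ← hrest_def, hsorted, List.map_cons,
          ih rest hlen_rest hrest_pw]
        congr 1
        · simp only [hcx, Prod.mk.injEq, true_and]
          push_cast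
          ring
        · apply List.map_congr_left
          intro k hk
          rw [hck k ((hmem_tail k).mp hk)]

theorem get_label_count_pairs_eq (src : List (String × List (List (String × String)))) :
    get_label_count_pairs src = get_label_count_pairs_alt src := by
  unfold get_label_count_pairs get_label_count_pairs_alt
  set d := PySem.Dict.ofList src with hd
  have hA := countsA_eq_counter d (PySem.Dict.nodup_keys_ofList src)
  simp only []
  rw [hA, PySem.Dict.keys_counter]
  -- B's flattened labels are flatLabels d
  have hlabels : d.values.flatMap (fun sentences =>
      sentences.flatMap (fun sentence => sentence.map (fun pair => pair.2))) = flatLabels d := by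
    rw [flatLabels, PySem.Dict.values, List.flatMap_map]
  rw [hlabels]
  set L := flatLabels d with hL
  set S := PySem.List.sorted L (fun x => x) with hS
  have hperm : S.Perm L := PySem.List.sorted_perm L (fun x => x) false
  rw [pyRunLengths_sorted S.length S le_rfl (PySem.List.sorted_pairwise L (fun x => x))]
  have hof : PySem.List.sorted (PySem.Set.ofList S) (fun x => x)
      = PySem.List.sorted (PySem.Set.ofList L) (fun x => x) := by
    apply PySem.List.sorted_eq_sorted_of_perm _ _ _ (fun a b h => h)
    rw [List.perm_ext_iff_of_nodup (PySem.Set.nodup_ofList _) (PySem.Set.nodup_ofList _)]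
    intro a
    rw [PySem.Set.mem_ofList, PySem.Set.mem_ofList, hperm.mem_iff]
  rw [hof]
  apply List.map_congr_left
  intro k _
  rw [hperm.count_eq k, PySem.Dict.getD_counter]

-- ===== VERDICT (by name: the statement is the Claim_ definition above) =====
theorem get_label_count_pairs_spec : Claim_equal_get_label_count_pairs := by
  intro src _
  unfold Spec_get_label_count_pairs
  exact get_label_count_pairs_eq src
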